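-- pv_equiv track=rewrite | github.com/HenriqueBBrum/Pre-filtering-Simulator | src/snort_parser/rule_to_match.py | __parse_pcre_modifiers
-- ===== SOURCE A (Python) =====
-- native_pcre_modifiers = {'i', 's', 'm', 'x'}
--
-- def __parse_pcre_modifiers(pcre_string, modifiers):
--     if not modifiers:
--         return pcre_string, modifiers
--
--     if len(set(modifiers)) != len(modifiers):
--         raise Exception("PCRE string with duplicate modifiers, fix it. PCRE: ", pcre_string, " modifiers: ", modifiers)
--
--     prepend_modifiers, snort_only_modifiers = "", ""
--     for char in modifiers:
--         if char in native_pcre_modifiers: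
--             prepend_modifiers+=char
--         elif char == 'A' and pcre_string[0] != '^':
--             pcre_string = '^' + pcre_string
--         elif char == 'R':
--             snort_only_modifiers = char
--
--     if prepend_modifiers:
--         pcre_string = "(?"+prepend_modifiers+')'+pcre_string
--     return pcre_string, snort_only_modifiers
-- ===== SOURCE B (Python) =====
-- native_pcre_modifiers = {'i', 's', 'm', 'x'}
--
-- def _scan(mods):
--     # Structural recursion over the modifier string, assembled back-to-front:
--     # returns (native_flags, anchored, snort_only).
--     if not mods:
--         return "", False, ""
--     flags, anchored, snort = _scan(mods[1:])
--     c = mods[0]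
--     if c in native_pcre_modifiers:
--         return c + flags, anchored, snort
--     if c == 'A':
--         return flags, True, snort
--     if c == 'R':
--         return flags, anchored, 'R'
--     return flags, anchored, snort
--
-- def __parse_pcre_modifiers(pcre_string, modifiers):
--     if not modifiers:
--         return pcre_string, modifiers
--
--     # duplicate detection by sort-then-adjacent-scan instead of set cardinality
--     s = sorted(modifiers)
--     if any(a == b for a, b in zip(s, s[1:])):
--         raise Exception("PCRE string with duplicate modifiers, fix it. PCRE: ", pcre_string, " modifiers: ", modifiers)
--
--     flags, anchored, snort = _scan(modifiers)
--     if anchored and pcre_string[0] != '^':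
--         pcre_string = '^' + pcre_string
--     if flags:
--         pcre_string = "(?" + flags + ")" + pcre_string
--     return pcre_string, snort
-- ===== Notes on version B (the rewrite author's own statement) =====
-- stated objective: alternative
-- what changed: Duplicate detection is done by sorting the modifiers and scanning adjacent pairs instead of comparing set cardinality, and the stateful loop that mutates three accumulators and rewrites pcre_string mid-loop is replaced by a structural recursion that classifies the modifiers back-to-front into (flags, anchored, snort) and assembles the result once at the end.
import Mathlib
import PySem

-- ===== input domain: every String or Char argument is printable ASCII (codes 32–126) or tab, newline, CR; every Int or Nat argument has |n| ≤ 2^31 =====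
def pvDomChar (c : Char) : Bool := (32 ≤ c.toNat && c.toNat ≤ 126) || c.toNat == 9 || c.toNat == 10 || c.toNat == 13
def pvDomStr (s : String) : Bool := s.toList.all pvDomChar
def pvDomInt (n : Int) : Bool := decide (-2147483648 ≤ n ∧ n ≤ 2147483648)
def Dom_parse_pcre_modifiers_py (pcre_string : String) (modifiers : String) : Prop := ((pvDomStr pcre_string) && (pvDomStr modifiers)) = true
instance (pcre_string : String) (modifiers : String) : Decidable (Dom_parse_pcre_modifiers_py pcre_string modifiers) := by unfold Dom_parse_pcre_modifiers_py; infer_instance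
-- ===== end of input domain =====

-- B detects duplicates by sort-then-adjacent-scan and classifies the modifiers by a structural
-- recursion assembled back-to-front, instead of A's set-cardinality check and stateful loop.

-- ===== PORT A =====
def pvNative : PySem.Set Char := PySem.Set.ofList ['i', 's', 'm', 'x']

def parse_pcre_modifiers_py (pcre_string : String) (modifiers : String) : String × String :=
  if modifiers.toList = [] then (pcre_string, modifiers)
  else if (PySem.Set.ofList modifiers.toList).length ≠ modifiers.toList.length then
    (pcre_string, modifiers)  -- Python raises Exception here (duplicate modifiers); excluded by Pre_
  else
    let st := modifiers.toList.foldl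
      (fun (st : List Char × List Char × List Char) char =>
        let (pcre, prepend, snort) := st
        if pvNative.contains char then (pcre, prepend ++ [char], snort)
        -- pcre[0]: Python raises IndexError on the empty string; excluded by Pre_ (getD unreached inside Pre_)
        else if char = 'A' ∧ (PySem.List.pyGet? pcre 0).getD '^' ≠ '^' then ('^' :: pcre, prepend, snort)
        else if char = 'R' then (pcre, prepend, ['R'])
        else (pcre, prepend, snort))
      (pcre_string.toList, [], [])
    let pcre := if st.2.1 ≠ [] then '(' :: '?' :: st.2.1 ++ [')'] ++ st.1 else st.1
    (String.ofList pcre, String.ofList st.2.2)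

-- ===== PORT B =====
-- _scan: structural recursion over the modifier characters, combined back-to-front
def pvScan : List Char → List Char × Bool × List Char
  | [] => ([], false, [])
  | c :: t =>
    let r := pvScan t
    if pvNative.contains c then (c :: r.1, r.2.1, r.2.2)
    else if c = 'A' then (r.1, true, r.2.2)
    else if c = 'R' then (r.1, r.2.1, ['R'])
    else r

def parse_pcre_modifiers_py_alt (pcre_string : String) (modifiers : String) : String × String :=
  if modifiers.toList = [] then (pcre_string, modifiers)
  else
    let s := PySem.List.sorted modifiers.toList (fun c => c) false
    -- zip(s, s[1:]) adjacent-pair duplicate scan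
    if (s.zip (PySem.List.slice s (some 1) none)).any (fun p => p.1 == p.2) then
      (pcre_string, modifiers)  -- Python raises Exception here (duplicate modifiers); excluded by Pre_
    else
      let r := pvScan modifiers.toList
      -- pcre_string[0]: Python raises IndexError on the empty string; excluded by Pre_
      let p1 := if r.2.1 = true ∧ (PySem.List.pyGet? pcre_string.toList 0).getD '^' ≠ '^'
                then '^' :: pcre_string.toList else pcre_string.toList
      let p2 := if r.1 ≠ [] then '(' :: '?' :: r.1 ++ [')'] ++ p1 else p1
      (String.ofList p2, String.ofList r.2.2)

-- ===== PRECONDITION & SPEC =====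
-- Pre_ excludes exactly the inputs where A raises: duplicate modifier characters (explicit raise),
-- and modifiers containing 'A' with an empty pcre_string (IndexError on pcre_string[0]).
def Pre_parse_pcre_modifiers_py (pcre_string : String) (modifiers : String) : Prop :=
  modifiers.toList.Nodup ∧ ('A' ∈ modifiers.toList → pcre_string.toList ≠ [])
instance (pcre_string : String) (modifiers : String) : Decidable (Pre_parse_pcre_modifiers_py pcre_string modifiers) := by
  unfold Pre_parse_pcre_modifiers_py; infer_instance

def pvWitness_parse_pcre_modifiers_py : String × String := ("abc", "iAR")

def Spec_parse_pcre_modifiers_py (pcre_string : String) (modifiers : String) (out : String × String) : Prop := out = parse_pcre_modifiers_py_alt pcre_string modifiers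
instance (pcre_string : String) (modifiers : String) (out : String × String) : Decidable (Spec_parse_pcre_modifiers_py pcre_string modifiers out) := by unfold Spec_parse_pcre_modifiers_py; infer_instance

-- ===== CLAIM (what is proved, stated in full; the proofs are below) =====
def Claim_equal_parse_pcre_modifiers_py : Prop := ∀ (pcre_string : String) (modifiers : String), Dom_parse_pcre_modifiers_py pcre_string modifiers → Pre_parse_pcre_modifiers_py pcre_string modifiers → Spec_parse_pcre_modifiers_py pcre_string modifiers (parse_pcre_modifiers_py pcre_string modifiers)

-- ===== LEMMAS AND PROOFS =====

-- Characterisation of A's loop under Nodup + nonempty-pcre-if-'A'.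
lemma pvLoopA_eq (l : List Char) (p prepend sn : List Char)
    (hnd : l.Nodup) (hp : 'A' ∈ l → p ≠ []) :
    l.foldl
      (fun (st : List Char × List Char × List Char) char =>
        let (pcre, prepend, snort) := st
        if pvNative.contains char then (pcre, prepend ++ [char], snort)
        else if char = 'A' ∧ (PySem.List.pyGet? pcre 0).getD '^' ≠ '^' then ('^' :: pcre, prepend, snort)
        else if char = 'R' then (pcre, prepend, ['R'])
        else (pcre, prepend, snort))
      (p, prepend, sn)
    = ((if 'A' ∈ l ∧ (PySem.List.pyGet? p 0).getD '^' ≠ '^' then '^' :: p else p),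
       prepend ++ l.filter (fun c => pvNative.contains c),
       (if 'R' ∈ l then ['R'] else sn)) := by
  induction l generalizing p prepend sn with
  | nil => simp
  | cons c t ih =>
    have hndt : t.Nodup := hnd.of_cons
    simp only [List.foldl_cons]
    by_cases hc : pvNative.contains c = true
    · have hcA : c ≠ 'A' := fun h => by subst h; exact absurd hc (by decide)
      have hcR : c ≠ 'R' := fun h => by subst h; exact absurd hc (by decide)
      rw [if_pos hc, ih p (prepend ++ [c]) sn hndt (fun h => hp (List.mem_cons_of_mem _ h))]
      have hcm : c ∈ pvNative := by simpa using hc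
      simp [Ne.symm hcA, Ne.symm hcR, List.mem_cons, hcm]
    · rw [if_neg hc]
      have hcm : c ∉ pvNative := by simpa using hc
      have hfil : (c :: t).filter (fun c => pvNative.contains c) = t.filter (fun c => pvNative.contains c) := by
        simp [hcm]
      by_cases hA : c = 'A' ∧ (PySem.List.pyGet? p 0).getD '^' ≠ '^'
      · rw [if_pos hA]
        have hAt : 'A' ∉ t := by rw [← hA.1]; exact (List.nodup_cons.mp hnd).1
        rw [ih ('^' :: p) prepend sn hndt (fun h => absurd h hAt)]
        have h0 : (PySem.List.pyGet? ('^' :: p) 0).getD '^' = '^' := by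
          simp [PySem.List.pyGet?, PySem.List.pyIdx?]
        rw [hfil]
        simp [hAt, List.mem_cons, hA.1, hA.2]
      · rw [if_neg hA]
        by_cases hR : c = 'R'
        · rw [if_pos hR, ih p prepend ['R'] hndt (fun h => hp (List.mem_cons_of_mem _ h))]
          have hcA : c ≠ 'A' := by rw [hR]; decide
          rw [hfil]
          simp [List.mem_cons, hR]
        · rw [if_neg hR, ih p prepend sn hndt (fun h => hp (List.mem_cons_of_mem _ h))]
          rw [hfil]
          by_cases hcA : c = 'A'
          · have hAt : 'A' ∉ t := by rw [← hcA]; exact (List.nodup_cons.mp hnd).1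
            have hhead : ¬ (PySem.List.pyGet? p 0).getD '^' ≠ '^' := fun h => hA ⟨hcA, h⟩
            simp [List.mem_cons, hcA, hAt, hhead]
          · simp [List.mem_cons, Ne.symm hcA, Ne.symm hR]

-- Characterisation of B's recursion: it computes the same three quantities.
lemma pvScan_eq (l : List Char) :
    pvScan l = (l.filter (fun c => pvNative.contains c),
                decide ('A' ∈ l),
                (if 'R' ∈ l then ['R'] else [])) := by
  induction l with
  | nil => simp [pvScan]
  | cons c t ih =>
    simp only [pvScan, ih]
    by_cases hc : pvNative.contains c = true
    · have hcA : c ≠ 'A' := fun h => by subst h; exact absurd hc (by decide)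
      have hcR : c ≠ 'R' := fun h => by subst h; exact absurd hc (by decide)
      have hcm : c ∈ pvNative := by simpa using hc
      simp [hcm, List.mem_cons, Ne.symm hcA, Ne.symm hcR]
    · have hcm : c ∉ pvNative := by simpa using hc
      by_cases hA : c = 'A'
      · subst hA; simp [List.mem_cons, hcm]
      · by_cases hR : c = 'R'
        · subst hR; simp [List.mem_cons, hcm, hA]
        · simp [List.mem_cons, hcm, hA, hR, Ne.symm hA, Ne.symm hR]

-- A Nodup list has no equal adjacent pair.
lemma pvNoAdj (l : List Char) (h : l.Nodup) :
    (l.zip l.tail).any (fun p => p.1 == p.2) = false := by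
  induction l with
  | nil => simp
  | cons c t ih =>
    cases t with
    | nil => simp
    | cons d t' =>
      have hcd : c ≠ d := by
        intro h'; subst h'
        exact (List.nodup_cons.mp h).1 (List.mem_cons_self)
      have := ih (List.nodup_cons.mp h).2
      simp only [List.tail_cons, List.zip_cons_cons, List.any_cons] at this ⊢
      simp [hcd, this]

-- A fold of Set.add over a list disjoint-nodup with the accumulator just appends.
lemma pvFoldlAdd (l : List Char) : ∀ (s : List Char), (s ++ l).Nodup →
    l.foldl PySem.Set.add s = s ++ l := by
  induction l with
  | nil => intro s _; simp
  | cons c t ih =>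
    intro s hs
    have hdisj := (List.nodup_append.mp hs).2.2
    have hc : c ∉ s := fun hmem => hdisj c hmem c List.mem_cons_self rfl
    have hadd : PySem.Set.add s c = s ++ [c] := by
      simp [PySem.Set.add, PySem.Set.contains, hc]
    have hs' : ((s ++ [c]) ++ t).Nodup := by
      simpa [List.append_assoc] using hs
    rw [List.foldl_cons, hadd, ih (s ++ [c]) hs']
    simp

-- Nodup implies set(l) == l (so A's cardinality check does not fire).
lemma pvOfList_eq_self (l : List Char) (h : l.Nodup) : PySem.Set.ofList l = l := by
  simpa using pvFoldlAdd l [] (by simpa using h)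

-- ===== VERDICT (by name: the statement is the Claim_ definition above) =====
theorem parse_pcre_modifiers_py_spec : Claim_equal_parse_pcre_modifiers_py := by
  intro pcre_string modifiers _ hpre
  obtain ⟨hnd, hA⟩ := hpre
  unfold Spec_parse_pcre_modifiers_py parse_pcre_modifiers_py parse_pcre_modifiers_py_alt
  by_cases h0 : modifiers.toList = []
  · simp [h0]
  · rw [if_neg h0, if_neg h0]
    have hdupA : ¬ (PySem.Set.ofList modifiers.toList).length ≠ modifiers.toList.length := by
      rw [pvOfList_eq_self _ hnd]; simp
    rw [if_neg hdupA]
    have hsortnd : (PySem.List.sorted modifiers.toList (fun c => c) false).Nodup :=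
      (PySem.List.sorted_perm modifiers.toList (fun c => c) false).nodup_iff.mpr hnd
    have hadj := pvNoAdj _ hsortnd
    simp only [PySem.List.slice_from_one, hadj, pvLoopA_eq _ _ _ _ hnd hA, pvScan_eq,
      Bool.false_eq_true, if_false]
    by_cases hin : 'A' ∈ modifiers.toList <;> simp [hin]
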